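-- pv_equiv track=rewrite | github.com/blmccabe/ai-accessibility-scanner | utils.py | split_html_safely
-- ===== SOURCE A (Python) =====
-- def split_html_safely(html_content, chunk_size=3000):
--     """Split HTML content at safe boundaries to avoid breaking tags."""
--     chunks = []
--     current = ""
--     tag_count = 0
--     for char in html_content:
--         current += char
--         if char == '<':
--             tag_count += 1
--         elif char == '>':
--             tag_count -= 1
--         if len(current) >= chunk_size and tag_count == 0:
--             chunks.append(current)
--             current = ""
--     if current:
--         chunks.append(current)
--     return chunks
-- ===== SOURCE B (Python) =====
-- def split_html_safely(html_content, chunk_size=3000):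
--     """Split HTML content at safe boundaries to avoid breaking tags.
--
--     Jumps between tag characters with str.find and emits whole chunks
--     arithmetically inside tag-free runs, instead of growing a string
--     character by character.
--     """
--     n = len(html_content)
--     step = chunk_size if chunk_size > 0 else 1
--     chunks = []
--     start = 0
--     depth = 0
--     pos = 0
--     while pos < n:
--         lt = html_content.find('<', pos)
--         gt = html_content.find('>', pos)
--         t = lt if lt != -1 else n
--         if gt != -1 and gt < t:
--             t = gt
--         if depth == 0:
--             e = start + step
--             if e < pos + 1:
--                 e = pos + 1
--             while e <= t:
--                 chunks.append(html_content[start:e])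
--                 start = e
--                 e = start + step
--         if t < n:
--             if html_content[t] == '<':
--                 depth += 1
--             else:
--                 depth -= 1
--             if t + 1 - start >= chunk_size and depth == 0:
--                 chunks.append(html_content[start:t + 1])
--                 start = t + 1
--         pos = t + 1
--     if start < n:
--         chunks.append(html_content[start:])
--     return chunks
-- ===== Notes on version B (the rewrite author's own statement) =====
-- stated objective: faster
-- what changed: Instead of accumulating a string char by char while counting tags, B jumps between tag characters with str.find, tracks tag depth and the chunk's start index, and emits whole chunks arithmetically as slices inside tag-free runs.
import Mathlib
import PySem

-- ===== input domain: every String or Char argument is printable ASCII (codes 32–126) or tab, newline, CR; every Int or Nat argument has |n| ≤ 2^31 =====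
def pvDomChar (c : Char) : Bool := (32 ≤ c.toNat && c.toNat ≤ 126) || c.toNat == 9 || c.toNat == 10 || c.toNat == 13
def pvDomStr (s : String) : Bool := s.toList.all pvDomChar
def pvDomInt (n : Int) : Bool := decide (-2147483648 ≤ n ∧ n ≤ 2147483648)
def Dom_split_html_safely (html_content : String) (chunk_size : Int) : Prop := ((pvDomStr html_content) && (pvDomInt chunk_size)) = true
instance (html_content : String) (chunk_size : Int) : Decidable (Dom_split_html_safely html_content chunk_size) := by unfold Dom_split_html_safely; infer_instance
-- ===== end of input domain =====

-- B replaces A's char-by-char scan with string accumulation by jumping between tag characters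
-- with str.find and emitting whole chunks as slices inside tag-free runs (objective: faster).

-- ===== PORT A =====
-- A's loop: accumulate `current`, count '<'/'>'; cut when len(current) >= chunk_size and tag_count == 0.
def pvA_loop (cs : Int) : List Char → List String → List Char → Int → List String
  | [], chunks, cur, _ =>
      if cur ≠ [] then chunks ++ [String.ofList cur] else chunks
  | c :: rest, chunks, cur, tc =>
      let cur' := cur ++ [c]
      let tc' := if c = '<' then tc + 1 else if c = '>' then tc - 1 else tc
      if cs ≤ (cur'.length : Int) ∧ tc' = 0 then
        pvA_loop cs rest (chunks ++ [String.ofList cur']) [] tc'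
      else
        pvA_loop cs rest chunks cur' tc'

def split_html_safely (html_content : String) (chunk_size : Int) : List String :=
  pvA_loop chunk_size html_content.toList [] [] 0

-- ===== PORT B =====
-- B's inner `while e <= t` loop: emit html[start:e] and advance e by step; fuel makes the
-- transcription total (it is always sufficient, proved below; step ≥ 1 in every call).
def pvB2_emit (full : List Char) (step t : Int) : Nat → Int → Int → List String → Int × List String
  | 0, _, start, chunks => (start, chunks)
  | fuel + 1, e, start, chunks =>
      if e ≤ t then
        pvB2_emit full step t fuel (e + step) e
          (chunks ++ [String.ofList (PySem.List.slice full (some start) (some e))])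
      else (start, chunks)

-- B's outer `while pos < n` loop (pos advances to t+1 every iteration, so fuel n+2 suffices);
-- the trailing `if start < n` append sits in the loop-exit branch.  `html_content[t]` is
-- ported as PySem.List.pyGet? (t is a valid index whenever that branch runs).
def pvB2_outer (full : List Char) (cs step n : Int) : Nat → Int → Int → Int → List String → List String
  | 0, _, _, _, chunks => chunks
  | fuel + 1, pos, start, depth, chunks =>
      if pos < n then
        let lt := PySem.Chars.findFrom full ['<'] pos
        let gt := PySem.Chars.findFrom full ['>'] pos
        let t1 := if lt ≠ -1 then lt else n
        let t := if gt ≠ -1 ∧ gt < t1 then gt else t1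
        let r :=
          if depth = 0 then
            let e0 := start + step
            let e1 := if e0 < pos + 1 then pos + 1 else e0
            pvB2_emit full step t (full.length + 1) e1 start chunks
          else (start, chunks)
        if t < n then
          let depth1 := if PySem.List.pyGet? full t = some '<' then depth + 1 else depth - 1
          if cs ≤ t + 1 - r.1 ∧ depth1 = 0 then
            pvB2_outer full cs step n fuel (t + 1) (t + 1) depth1
              (r.2 ++ [String.ofList (PySem.List.slice full (some r.1) (some (t + 1)))])
          else
            pvB2_outer full cs step n fuel (t + 1) r.1 depth1 r.2
        else
          pvB2_outer full cs step n fuel (t + 1) r.1 depth r.2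
      else if start < n then chunks ++ [String.ofList (PySem.List.slice full (some start) none)]
      else chunks

def split_html_safely_alt (html_content : String) (chunk_size : Int) : List String :=
  let full := html_content.toList
  let step := if 0 < chunk_size then chunk_size else 1
  pvB2_outer full chunk_size step (full.length : Int) (full.length + 2) 0 0 0 []

-- ===== PRECONDITION & SPEC =====
def Spec_split_html_safely (html_content : String) (chunk_size : Int) (out : List String) : Prop := out = split_html_safely_alt html_content chunk_size
instance (html_content : String) (chunk_size : Int) (out : List String) : Decidable (Spec_split_html_safely html_content chunk_size out) := by unfold Spec_split_html_safely; infer_instance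

-- ===== CLAIM (what is proved, stated in full; the proofs are below) =====
def Claim_equal_split_html_safely : Prop := ∀ (html_content : String) (chunk_size : Int), Dom_split_html_safely html_content chunk_size → Spec_split_html_safely html_content chunk_size (split_html_safely html_content chunk_size)

-- ===== LEMMAS AND PROOFS =====

-- Proof-side midpoint B1: the same split expressed as a per-char index scan over the input;
-- A ≡ B1 (pv_loop_eq) and B1 ≡ B2 (pv_outer_eq) below.
def pvB_loop (full : List Char) (cs : Int) : List Char → Nat → Int → Int → List String → List String
  | [], _, start, _, chunks =>
      if start < (full.length : Int) then
        chunks ++ [String.ofList (PySem.List.slice full (some start) none)]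
      else chunks
  | c :: rest, i, start, depth, chunks =>
      let depth' := if c = '<' then depth + 1 else if c = '>' then depth - 1 else depth
      if cs ≤ (i : Int) + 1 - start ∧ depth' = 0 then
        pvB_loop full cs rest (i + 1) ((i : Int) + 1) depth'
          (chunks ++ [String.ofList (PySem.List.slice full (some start) (some ((i : Int) + 1)))])
      else
        pvB_loop full cs rest (i + 1) start depth' chunks

def pvIsTag (c : Char) : Bool := c == '<' || c == '>'

-- A ≡ B1: A's accumulated `cur` is exactly full[start:i].
theorem pv_loop_eq (cs : Int) (full : List Char) :
    ∀ (l : List Char) (i start : Nat) (chunks : List String) (tc : Int),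
      start ≤ i → i + l.length = full.length → full.drop i = l →
      pvA_loop cs l chunks ((full.drop start).take (i - start)) tc
        = pvB_loop full cs l i (start : Int) tc chunks := by
  intro l
  induction l with
  | nil =>
      intro i start chunks tc hsi hlen hdrop
      simp at hlen
      subst hlen
      rw [pvA_loop, pvB_loop, PySem.List.slice_from_natCast]
      have htake : (full.drop start).take (full.length - start) = full.drop start := by
        apply List.take_of_length_le
        simp
      rw [htake]
      have hne : (full.drop start ≠ []) ↔ ((start : Int) < (full.length : Int)) := by
        rw [ne_eq, List.drop_eq_nil_iff]
        constructor
        · intro h; exact_mod_cast Nat.lt_of_not_le h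
        · intro h hle; exact absurd hle (Nat.not_le_of_lt (by exact_mod_cast h))
      by_cases h : full.drop start = []
      · rw [if_neg (by simpa using h), if_neg (by rw [← hne]; simpa using h)]
      · rw [if_pos h, if_pos (hne.mp h)]
  | cons c rest ih =>
      intro i start chunks tc hsi hlen hdrop
      have hi : i < full.length := by simp at hlen; omega
      have hgi : full[i]? = some c := by
        have h : (full.drop i)[0]? = some c := by rw [hdrop]; rfl
        rw [List.getElem?_drop] at h
        simpa using h
      have hdrop' : full.drop (i + 1) = rest := by
        have h : List.drop 1 (List.drop i full) = rest := by rw [hdrop]; rfl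
        rwa [List.drop_drop] at h
      have hcur : (full.drop start).take (i - start) ++ [c] = (full.drop start).take (i + 1 - start) := by
        have h1 : i + 1 - start = (i - start) + 1 := by omega
        rw [h1, List.take_add_one]
        have : (full.drop start)[i - start]? = some c := by
          rw [List.getElem?_drop]
          have : start + (i - start) = i := by omega
          rw [this, hgi]
        rw [this]
        rfl
      have hlencur : (((full.drop start).take (i + 1 - start)).length : Int) = (i : Int) + 1 - (start : Int) := by
        rw [List.length_take, List.length_drop]
        have : min (i + 1 - start) (full.length - start) = i + 1 - start := by omega
        rw [this]
        omega
      rw [pvA_loop, pvB_loop]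
      simp only [hcur, hlencur]
      by_cases hcut : cs ≤ (i : Int) + 1 - (start : Int) ∧ (if c = '<' then tc + 1 else if c = '>' then tc - 1 else tc) = 0
      · rw [if_pos hcut, if_pos hcut]
        have hslice : PySem.List.slice full (some (start : Int)) (some ((i : Int) + 1))
            = (full.drop start).take (i + 1 - start) := by
          have : ((i : Int) + 1) = ((i + 1 : Nat) : Int) := by push_cast; ring
          rw [this, PySem.List.slice_natCast]
        rw [hslice]
        have := ih (i + 1) (i + 1) (chunks ++ [String.ofList ((full.drop start).take (i + 1 - start))])
          (if c = '<' then tc + 1 else if c = '>' then tc - 1 else tc) (le_refl _) (by simp at hlen ⊢; omega) hdrop'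
        simp only [Nat.sub_self, List.take_zero] at this
        push_cast at this
        exact this
      · rw [if_neg hcut, if_neg hcut]
        exact ih (i + 1) start chunks _ (by omega) (by simp at hlen ⊢; omega) hdrop'

-- str.find with a single-char needle, characterised by List.findIdx.
theorem pv_find_go_single (c : Char) :
    ∀ (xs : List Char) (k : Nat),
      PySem.Chars.find.go [c] xs k
        = if xs.findIdx (· == c) < xs.length then ((k + xs.findIdx (· == c) : Nat) : Int) else -1 := by
  intro xs
  induction xs with
  | nil => intro k; simp [PySem.Chars.find.go]
  | cons h t ih =>
      intro k
      rw [PySem.Chars.find.go]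
      by_cases hc : h = c
      · subst hc
        simp [List.isPrefixOf, List.findIdx_cons]
      · have h1 : ([c].isPrefixOf (h :: t)) = false := by
          simp [List.isPrefixOf]
          exact fun e => absurd e.symm hc
        have h2 : (h == c) = false := by simp [hc]
        rw [if_neg (by simp [h1])]
        rw [ih (k + 1)]
        simp only [List.findIdx_cons, h2, cond_false, List.length_cons]
        split_ifs with hlt h2' h2'
        · push_cast; ring
        · omega
        · omega
        · rfl

theorem pv_findFrom_single (full : List Char) (c : Char) (pos : Nat) (hpos : pos ≤ full.length) :
    PySem.Chars.findFrom full [c] (pos : Int) none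
      = (if (full.drop pos).findIdx (· == c) < (full.drop pos).length
         then ((pos + (full.drop pos).findIdx (· == c) : Nat) : Int) else -1) := by
  have h1 : ¬((pos : Int) < 0) := by omega
  have h2 : ¬((full.length : Int) < (pos : Int)) := by exact_mod_cast not_lt.mpr (by exact_mod_cast hpos)
  simp only [PySem.Chars.findFrom, PySem.Chars.find, if_neg h1, if_neg h2]
  rw [pv_find_go_single]
  simp only [Int.toNat_natCast, List.take_length]
  by_cases hlt : (full.drop pos).findIdx (· == c) < (full.drop pos).length
  · rw [if_pos hlt, if_pos hlt, if_neg (by omega)]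
    push_cast; ring
  · rw [if_neg hlt, if_neg hlt, if_pos rfl]

theorem pv_findIdx_min (p q : Char → Bool) :
    ∀ (d : List Char), d.findIdx (fun x => p x || q x) = min (d.findIdx p) (d.findIdx q) := by
  intro d
  induction d with
  | nil => simp
  | cons a t ih =>
      simp only [List.findIdx_cons]
      cases hpa : p a
      · cases hqa : q a
        · simp only [Bool.or_self, cond_false, ih]; omega
        · simp only [Bool.or_true, cond_true, cond_false]; omega
      · cases hqa : q a <;> simp only [Bool.true_or, cond_true, cond_false] <;> omega

-- the `t` computed by B2 is pos + (index of the first tag char of full.drop pos).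
theorem pv_t_eq (full : List Char) (pos : Nat) (hpos : pos ≤ full.length) :
    (let lt := PySem.Chars.findFrom full ['<'] (pos : Int) none
     let gt := PySem.Chars.findFrom full ['>'] (pos : Int) none
     let t1 := if lt ≠ -1 then lt else (full.length : Int)
     if gt ≠ -1 ∧ gt < t1 then gt else t1)
      = ((pos + (full.drop pos).findIdx pvIsTag : Nat) : Int) := by
  have hmin : (full.drop pos).findIdx pvIsTag
      = min ((full.drop pos).findIdx (· == '<')) ((full.drop pos).findIdx (· == '>')) := by
    unfold pvIsTag
    exact pv_findIdx_min (· == '<') (· == '>') (full.drop pos)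
  have hj1 := List.findIdx_le_length (p := (· == '<')) (xs := full.drop pos)
  have hj2 := List.findIdx_le_length (p := (· == '>')) (xs := full.drop pos)
  have hlen : (full.drop pos).length = full.length - pos := List.length_drop ..
  simp only [pv_findFrom_single full '<' pos hpos, pv_findFrom_single full '>' pos hpos, hmin]
  by_cases h1 : (full.drop pos).findIdx (· == '<') < (full.drop pos).length <;>
    by_cases h2 : (full.drop pos).findIdx (· == '>') < (full.drop pos).length <;>
      simp only [h1, h2] <;> split_ifs <;> push_cast <;> omega

-- emit preserves 0 ≤ start ≤ t.
theorem pv_emit_bounds (full : List Char) (step t : Int) (hstep : 0 ≤ step) :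
    ∀ (f : Nat) (e start : Int) (chunks : List String), 0 ≤ e → 0 ≤ start → start ≤ t →
      0 ≤ (pvB2_emit full step t f e start chunks).1 ∧ (pvB2_emit full step t f e start chunks).1 ≤ t := by
  intro f
  induction f with
  | zero => intro e start chunks he hs hst; exact ⟨hs, hst⟩
  | succ f ih =>
      intro e start chunks he hs hst
      rw [pvB2_emit]
      by_cases hle : e ≤ t
      · rw [if_pos hle]
        exact ih (e + step) e _ (by omega) he hle
      · rw [if_neg hle]
        exact ⟨hs, hst⟩

-- over a tag-free run with depth ≠ 0, B1 just advances.
theorem pv_skip (full : List Char) (cs : Int) :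
    ∀ (seg rest : List Char) (pos : Nat) (start depth : Int) (chunks : List String),
      depth ≠ 0 → (∀ c ∈ seg, pvIsTag c = false) →
      pvB_loop full cs (seg ++ rest) pos start depth chunks
        = pvB_loop full cs rest (pos + seg.length) start depth chunks := by
  intro seg
  induction seg with
  | nil => intro rest pos start depth chunks _ _; simp
  | cons c seg' ih =>
      intro rest pos start depth chunks hd htag
      have hc := htag c (by simp)
      have hc1 : c ≠ '<' := by intro h; subst h; simp [pvIsTag] at hc
      have hc2 : c ≠ '>' := by intro h; subst h; simp [pvIsTag] at hc
      rw [List.cons_append, pvB_loop]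
      simp only [if_neg hc1, if_neg hc2]
      rw [if_neg (by intro h; exact hd h.2)]
      have := ih rest (pos + 1) start depth chunks hd (fun x hx => htag x (by simp [hx]))
      rw [this]
      have harr : pos + 1 + seg'.length = pos + (seg'.length + 1) := by omega
      rw [harr]
      rfl

-- over a tag-free run with depth 0, B1's per-char cuts are exactly B2's arithmetic emission.
theorem pv_run (full : List Char) (cs step : Int) (hstep : step = if 0 < cs then cs else 1) :
    ∀ (seg rest : List Char) (pos : Nat) (start : Int) (chunks : List String) (f : Nat),
      (∀ c ∈ seg, pvIsTag c = false) → 0 ≤ start → start ≤ (pos : Int) → (seg.length : Int) ≤ (f : Int) →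
      pvB_loop full cs (seg ++ rest) pos start 0 chunks
        = (let e0 := start + step
           let e1 := if e0 < (pos : Int) + 1 then (pos : Int) + 1 else e0
           let r := pvB2_emit full step ((pos : Int) + seg.length) f e1 start chunks
           pvB_loop full cs rest (pos + seg.length) r.1 0 r.2) := by
  have hstep1 : 1 ≤ step := by rw [hstep]; split_ifs <;> omega
  intro seg
  induction seg with
  | nil =>
      intro rest pos start chunks f _ hs0 hsp _
      simp only [List.nil_append, List.length_nil, Nat.cast_zero, add_zero]
      cases f with
      | zero => rfl
      | succ f =>
          rw [pvB2_emit, if_neg (by split_ifs <;> omega)]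
  | cons c seg' ih =>
      intro rest pos start chunks f htag hs0 hsp hf
      have hc := htag c (by simp)
      have hc1 : c ≠ '<' := by intro h; subst h; simp [pvIsTag] at hc
      have hc2 : c ≠ '>' := by intro h; subst h; simp [pvIsTag] at hc
      rw [List.cons_append, pvB_loop]
      simp only [if_neg hc1, if_neg hc2]
      obtain ⟨f', rfl⟩ : ∃ f', f = f' + 1 := by
        cases f with
        | zero => simp at hf; omega
        | succ f => exact ⟨f, rfl⟩
      have hf' : ((seg'.length : Int)) ≤ (f' : Int) := by
        simp at hf ⊢; omega
      have ht : (pos : Int) + ((c :: seg').length : Int) = ((pos + 1 : Nat) : Int) + (seg'.length : Int) := by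
        simp only [List.length_cons]; push_cast; ring
      by_cases hcut : cs ≤ (pos : Int) + 1 - start
      · rw [if_pos ⟨hcut, trivial⟩]
        have he1 : (if start + step < (pos : Int) + 1 then (pos : Int) + 1 else start + step) = (pos : Int) + 1 := by
          rw [hstep]; split_ifs <;> omega
        rw [he1]
        rw [pvB2_emit, if_pos (by omega)]
        have := ih rest (pos + 1) ((pos : Int) + 1)
          (chunks ++ [String.ofList (PySem.List.slice full (some start) (some ((pos : Int) + 1)))]) f'
          (fun x hx => htag x (by simp [hx])) (by omega) (by push_cast; omega) hf'
        simp only at this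
        rw [this]
        have he1' : (if (pos : Int) + 1 + step < ((pos + 1 : Nat) : Int) + 1 then ((pos + 1 : Nat) : Int) + 1 else (pos : Int) + 1 + step)
            = (pos : Int) + 1 + step := by push_cast; split_ifs <;> omega
        rw [he1']
        have harr : pos + 1 + seg'.length = pos + (c :: seg').length := by simp; omega
        rw [harr]
        have hcast : ((pos + 1 : Nat) : Int) + (seg'.length : Int) = (pos : Int) + ((c :: seg').length : Int) := by
          simp only [List.length_cons]; push_cast; ring
        rw [hcast]
      · rw [if_neg (by intro h; exact hcut h.1)]
        have hcs : 0 < cs := by omega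
        have hstepcs : step = cs := by rw [hstep, if_pos hcs]
        have he0 : ¬ (start + step < (pos : Int) + 1) := by omega
        have he0' : ¬ (start + step < ((pos + 1 : Nat) : Int) + 1) := by push_cast; omega
        have := ih rest (pos + 1) start chunks (f' + 1)
          (fun x hx => htag x (by simp [hx])) hs0 (by push_cast; omega) (by push_cast at hf ⊢; omega)
        simp only at this
        rw [this, if_neg he0', if_neg he0]
        have harr : pos + 1 + seg'.length = pos + (c :: seg').length := by simp; omega
        rw [harr]
        have hcast : ((pos + 1 : Nat) : Int) + (seg'.length : Int) = (pos : Int) + ((c :: seg').length : Int) := by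
          simp only [List.length_cons]; push_cast; ring
        rw [hcast]

-- B1 ≡ B2.
theorem pv_outer_eq (full : List Char) (cs step : Int) (hstep : step = if 0 < cs then cs else 1) :
    ∀ (fuel pos : Nat) (start depth : Int) (chunks : List String),
      pos ≤ full.length → 0 ≤ start → start ≤ (pos : Int) → full.length + 2 ≤ fuel + pos →
      pvB_loop full cs (full.drop pos) pos start depth chunks
        = pvB2_outer full cs step (full.length : Int) fuel (pos : Int) start depth chunks := by
  have hstep1 : 1 ≤ step := by rw [hstep]; split_ifs <;> omega
  intro fuel
  induction fuel with
  | zero => intro pos start depth chunks hpos _ _ hfuel; omega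
  | succ fuel ih =>
      intro pos start depth chunks hpos hs0 hsp hfuel
      rw [pvB2_outer]
      by_cases hlt : pos < full.length
      case neg =>
        have hpe : pos = full.length := by omega
        have hdrop : full.drop pos = [] := by rw [List.drop_eq_nil_iff]; omega
        have hnp : ¬((pos : Int) < (full.length : Int)) := by
          rw [hpe]; omega
        rw [hdrop, pvB_loop, if_neg hnp]
      case pos =>
        rw [if_pos (by exact_mod_cast hlt)]
        simp only [pv_t_eq full pos (le_of_lt hlt)]
        have hjle : (full.drop pos).findIdx pvIsTag ≤ (full.drop pos).length :=
          List.findIdx_le_length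
        have hdlen : (full.drop pos).length = full.length - pos := List.length_drop
        -- the tag-free run
        have hsplit : full.drop pos
            = (full.drop pos).take ((full.drop pos).findIdx pvIsTag)
              ++ (full.drop pos).drop ((full.drop pos).findIdx pvIsTag) :=
          (List.take_append_drop _ _).symm
        have hseglen : ((full.drop pos).take ((full.drop pos).findIdx pvIsTag)).length
            = (full.drop pos).findIdx pvIsTag := by
          rw [List.length_take]; omega
        have htagfree : ∀ c ∈ (full.drop pos).take ((full.drop pos).findIdx pvIsTag), pvIsTag c = false := by
          intro c hc
          obtain ⟨i, hi, rfl⟩ := List.mem_iff_getElem.mp hc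
          rw [List.getElem_take]
          exact List.not_of_lt_findIdx (by omega)
        have hrest : (full.drop pos).drop ((full.drop pos).findIdx pvIsTag)
            = full.drop (pos + (full.drop pos).findIdx pvIsTag) := by
          rw [List.drop_drop]
        -- reduce B1 over the run, in both depth cases, to the continuation at pos+tn with state r
        have hcont :
            pvB_loop full cs (full.drop pos) pos start depth chunks
              = (let r := if depth = 0 then
                    (let e0 := start + step
                     let e1 := if e0 < (pos : Int) + 1 then (pos : Int) + 1 else e0
                     pvB2_emit full step ((pos + (full.drop pos).findIdx pvIsTag : Nat) : Int)
                       (full.length + 1) e1 start chunks)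
                  else (start, chunks)
                 pvB_loop full cs (full.drop (pos + (full.drop pos).findIdx pvIsTag))
                   (pos + (full.drop pos).findIdx pvIsTag) r.1 depth r.2) := by
          by_cases hd : depth = 0
          · subst hd
            rw [if_pos rfl]
            conv_lhs => rw [hsplit]
            have := pv_run full cs step hstep
              ((full.drop pos).take ((full.drop pos).findIdx pvIsTag))
              ((full.drop pos).drop ((full.drop pos).findIdx pvIsTag))
              pos start chunks (full.length + 1) htagfree hs0 hsp
              (by rw [hseglen]; omega)
            simp only at this
            rw [this, hseglen, hrest]
            push_cast
            rfl
          · rw [if_neg hd]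
            conv_lhs => rw [hsplit]
            rw [pv_skip full cs _ _ pos start depth chunks hd htagfree, hseglen, hrest]
        rw [hcont]
        simp only []
        -- continuation: tag char or end of string
        set tn := (full.drop pos).findIdx pvIsTag with htn
        set r : Int × List String :=
          (if depth = 0 then
              pvB2_emit full step ((pos + tn : Nat) : Int) (full.length + 1)
                (if start + step < (pos : Int) + 1 then (pos : Int) + 1 else start + step) start chunks
            else (start, chunks)) with hrdef
        have hr0 : 0 ≤ r.1 ∧ r.1 ≤ ((pos + tn : Nat) : Int) := by
          rw [hrdef]
          by_cases hd : depth = 0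
          · rw [if_pos hd]
            exact pv_emit_bounds full step _ (by omega) _ _ _ _
              (by split_ifs <;> omega) hs0 (by push_cast; omega)
          · rw [if_neg hd]
            exact ⟨hs0, by push_cast; omega⟩
        by_cases htl : pos + tn < full.length
        · have htn_lt : tn < (full.drop pos).length := by omega
          have hc0tag : pvIsTag (full[pos + tn]'htl) = true := by
            have h1 : (full.drop pos)[tn]'htn_lt = full[pos + tn]'htl := by
              rw [List.getElem_drop]
            rw [← h1]
            exact List.findIdx_getElem
          have hget : PySem.List.pyGet? full ((pos + tn : Nat) : Int) = some (full[pos + tn]'htl) := by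
            rw [PySem.List.pyGet?_natCast]
            exact List.getElem?_eq_getElem htl
          rw [List.drop_eq_getElem_cons htl, pvB_loop]
          rw [if_pos (show ((pos + tn : Nat) : Int) < (full.length : Int) by exact_mod_cast htl)]
          rw [hget]
          have hdepth : (if full[pos + tn]'htl = '<' then depth + 1
                else if full[pos + tn]'htl = '>' then depth - 1 else depth)
              = (if (some (full[pos + tn]'htl) : Option Char) = some '<' then depth + 1 else depth - 1) := by
            by_cases hc0 : full[pos + tn]'htl = '<'
            · simp [hc0]
            · have hc0' : full[pos + tn]'htl = '>' := by
                simp [pvIsTag, hc0] at hc0tag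
                exact hc0tag
              simp [hc0']
          rw [hdepth]
          have hcast1 : ((pos + tn + 1 : Nat) : Int) = ((pos + tn : Nat) : Int) + 1 := by push_cast; ring
          set dd := (if (some (full[pos + tn]'htl) : Option Char) = some '<' then depth + 1 else depth - 1) with hdd
          by_cases hcond : cs ≤ ((pos + tn : Nat) : Int) + 1 - r.1 ∧ dd = 0
          · rw [if_pos hcond, if_pos hcond]
            have := ih (pos + tn + 1) (((pos + tn + 1 : Nat)) : Int) dd
              (r.2 ++ [String.ofList (PySem.List.slice full (some r.1) (some (((pos + tn : Nat) : Int) + 1)))])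
              (by omega) (by positivity) (le_refl _) (by omega)
            rw [hcast1] at this
            exact this
          · rw [if_neg hcond, if_neg hcond]
            have := ih (pos + tn + 1) r.1 dd r.2
              (by omega) hr0.1 (by push_cast at hr0 ⊢; omega) (by omega)
            rw [hcast1] at this
            exact this
        · have hpt : pos + tn = full.length := by omega
          have hdrop2 : full.drop (pos + tn) = [] := by rw [List.drop_eq_nil_iff]; omega
          rw [hdrop2, pvB_loop]
          rw [if_neg (show ¬(((pos + tn : Nat) : Int) < (full.length : Int)) by
            push_cast; omega)]
          cases fuel with
          | zero => exact absurd hfuel (by omega)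
          | succ f =>
              rw [pvB2_outer]
              rw [if_neg (show ¬(((pos + tn : Nat) : Int) + 1 < (full.length : Int)) by
                push_cast; omega)]

-- ===== VERDICT (by name: the statement is the Claim_ definition above) =====
theorem split_html_safely_spec : Claim_equal_split_html_safely := by
  intro html_content chunk_size _
  unfold Spec_split_html_safely split_html_safely split_html_safely_alt
  have h1 := pv_loop_eq chunk_size html_content.toList html_content.toList 0 0 [] 0
    (le_refl _) (by simp) (by simp)
  have h2 := pv_outer_eq html_content.toList chunk_size
    (if 0 < chunk_size then chunk_size else 1) rfl (html_content.toList.length + 2) 0 0 0 []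
    (Nat.zero_le _) (le_refl _) (le_refl _) (by omega)
  simp only [List.drop_zero] at h2
  simpa using h1.trans h2
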